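-- pv_equiv track=rewrite | github.com/pypi-data/pypi-mirror-399 | packages/drf-commons/drf_commons-1.0.1.tar.gz/drf_commons-1.0.1/drf_commons/services/export_file/data_processor.py | extract_common_values_and_filter_columns
-- ===== SOURCE A (Python) =====
-- from typing import Any, Dict, List, Tuple
--
-- def extract_common_values_and_filter_columns(
--     data: List[Dict], includes: List[str], column_config: Dict[str, Dict]
-- ) -> Tuple[Dict[str, str], List[str]]:
--     """
--     Extract common values for fields marked with can_be_common=True and filter out those columns.
--
--     Args:
--         data: List of data dictionaries
--         includes: List of field names to include
--         column_config: Column configuration with labels and can_be_common flags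
--
--     Returns:
--         Tuple of (common_values_dict, remaining_field_names)
--     """
--     common_values = {}
--     remaining_includes = []
--
--     for field_name in includes:
--         field_config = column_config.get(field_name, {})
--
--         # Check if this field can be common
--         if field_config.get("can_be_common", False):
--             # Check if all values are the same for this field and not null/empty
--             values = [row.get(field_name) for row in data]
--             non_empty_values = [
--                 v for v in values if v is not None and str(v).strip() != ""
--             ]
--             unique_values = set(
--                 str(v) for v in non_empty_values
--             )  # Convert to string for comparison
--
--             # If all non-empty values are the same, we have at least one value, and all records have this value
--             if (
--                 len(unique_values) == 1
--                 and len(non_empty_values) > 0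
--                 and len(non_empty_values) == len(data)
--             ):
--                 field_label = field_config.get(
--                     "label", field_name.replace("_", " ").title()
--                 )
--                 common_values[field_label] = list(unique_values)[0]
--                 # Don't include this field in the table
--                 continue
--
--         # Include this field in the table
--         remaining_includes.append(field_name)
--
--     return common_values, remaining_includes
-- ===== SOURCE B (Python) =====
-- from typing import Any, Dict, List, Tuple
--
-- def extract_common_values_and_filter_columns(
--     data: List[Dict], includes: List[str], column_config: Dict[str, Dict]
-- ) -> Tuple[Dict[str, str], List[str]]:
--     # Ordered distinct can_be_common fields.
--     fields = []
--     for f in includes: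
--         if column_config.get(f, {}).get("can_be_common", False) and f not in fields:
--             fields.append(f)
--     # One row-major pass: per-field state None = no row seen, else (first_str, ok).
--     states = [None] * len(fields)
--     for row in data:
--         new_states = []
--         for f, st in zip(fields, states):
--             v = row.get(f)
--             s = None if v is None or str(v).strip() == "" else str(v)
--             if st is None:
--                 new_states.append((s, True) if s is not None else ("", False))
--             else:
--                 first, ok = st
--                 new_states.append((first, ok and s is not None and s == first))
--         states = new_states
--     state_of = dict(zip(fields, states))
--     common_values = {}
--     remaining_includes = []
--     for f in includes:
--         cfg = column_config.get(f, {})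
--         st = state_of.get(f)
--         if st is not None and st[1]:
--             label = cfg.get("label", f.replace("_", " ").title())
--             common_values[label] = st[0]
--         else:
--             remaining_includes.append(f)
--     return common_values, remaining_includes
-- ===== Notes on version B (the rewrite author's own statement) =====
-- stated objective: alternative
-- what changed: Replaces A's three column-wise comprehensions plus a set per can_be_common field with one fused row-major scan that maintains a per-field (first value, consistent-so-far) state, followed by an ordering pass over includes.
import Mathlib
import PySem

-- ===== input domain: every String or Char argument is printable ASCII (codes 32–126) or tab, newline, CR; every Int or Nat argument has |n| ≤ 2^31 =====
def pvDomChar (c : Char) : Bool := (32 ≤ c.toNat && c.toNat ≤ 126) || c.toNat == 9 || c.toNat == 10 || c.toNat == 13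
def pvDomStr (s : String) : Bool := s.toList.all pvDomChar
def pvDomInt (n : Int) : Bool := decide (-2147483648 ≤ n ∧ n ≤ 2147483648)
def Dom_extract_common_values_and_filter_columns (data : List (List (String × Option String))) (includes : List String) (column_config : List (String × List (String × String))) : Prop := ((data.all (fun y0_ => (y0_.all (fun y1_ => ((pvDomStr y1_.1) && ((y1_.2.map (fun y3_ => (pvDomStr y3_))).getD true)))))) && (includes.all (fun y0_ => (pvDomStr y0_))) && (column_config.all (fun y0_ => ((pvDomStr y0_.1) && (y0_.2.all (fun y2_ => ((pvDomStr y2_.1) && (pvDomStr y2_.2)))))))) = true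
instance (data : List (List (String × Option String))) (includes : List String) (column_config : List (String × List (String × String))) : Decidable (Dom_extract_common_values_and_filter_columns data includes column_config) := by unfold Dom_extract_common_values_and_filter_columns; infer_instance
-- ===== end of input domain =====

-- B replaces A's three column-wise comprehensions + set per can_be_common field by one fused
-- row-major scan keeping a per-field (first value, consistent-so-far) state, then an ordering
-- pass over includes (objective: alternative decomposition, same cost).

-- shared primitive helpers (ports of Python built-ins, used identically by both ports)
-- str.title(), exact on ASCII: a letter is uppercased iff the previous character is not a letter
def pvTitleChars : List Char → Bool → List Char
  | [], _ => []
  | c :: cs, prev =>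
    (if PySem.Chars.isalpha c then
      (if prev then PySem.Chars.lowerChar c else PySem.Chars.upperChar c)
     else c) :: pvTitleChars cs (PySem.Chars.isalpha c)

def pvTitle (s : String) : String := String.ofList (pvTitleChars s.toList false)

-- truthiness of field_config.get("can_be_common", False): missing key -> False, a str -> s != ""
def pvTruthy (o : Option String) : Bool :=
  match o with
  | some s => !(s == "")
  | none => false

-- ===== PORT A =====
def extract_common_values_and_filter_columns (data : List (List (String × Option String))) (includes : List String) (column_config : List (String × List (String × String))) : (List (String × String)) × List String :=
  let r := includes.foldl (fun (acc : PySem.Dict String String × List String) field_name =>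
    let field_config : List (String × String) := (PySem.Dict.mk column_config).getD field_name []
    if pvTruthy ((PySem.Dict.mk field_config).get? "can_be_common") then
      let values : List (Option String) := data.map (fun row => ((PySem.Dict.mk row).get? field_name).join)
      let non_empty_values := values.filter (fun v => v.isSome && !(PySem.Str.strip (v.getD "") == ""))
      let unique_values := PySem.Set.ofList (non_empty_values.map (fun v => v.getD ""))
      if unique_values.length == 1 && decide (0 < non_empty_values.length) && non_empty_values.length == data.length then
        let field_label := (PySem.Dict.mk field_config).getD "label" (pvTitle (PySem.Str.replace field_name "_" " "))
        (acc.1.insert field_label (unique_values.headD ""), acc.2)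
      else
        (acc.1, acc.2 ++ [field_name])
    else
      (acc.1, acc.2 ++ [field_name])) (PySem.Dict.empty, [])
  (r.1.items, r.2)

-- ===== PORT B =====
-- s = None if v is None or str(v).strip() == "" else str(v)
def pvNorm (row : List (String × Option String)) (f : String) : Option String :=
  match ((PySem.Dict.mk row).get? f).join with
  | some s => if PySem.Str.strip s == "" then none else some s
  | none => none

def pvUpd (st : Option (String × Bool)) (s : Option String) : Option (String × Bool) :=
  match st with
  | none =>
    (match s with
     | some t => some (t, true)
     | none => some ("", false))
  | some (first, ok) =>
    some (first, ok && (match s with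
                        | some t => t == first
                        | none => false))

def extract_common_values_and_filter_columns_alt (data : List (List (String × Option String))) (includes : List String) (column_config : List (String × List (String × String))) : (List (String × String)) × List String :=
  let fields := includes.foldl (fun fs f =>
    if pvTruthy ((PySem.Dict.mk ((PySem.Dict.mk column_config).getD f [])).get? "can_be_common") && !(fs.contains f)
    then fs ++ [f] else fs) []
  let states := data.foldl
    (fun (sts : List (Option (String × Bool))) row =>
      (fields.zip sts).map (fun p => pvUpd p.2 (pvNorm row p.1)))
    (fields.map (fun _ => (none : Option (String × Bool))))
  let state_of := PySem.Dict.mk (fields.zip states)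
  let r := includes.foldl (fun (acc : PySem.Dict String String × List String) f =>
    let cfg : List (String × String) := (PySem.Dict.mk column_config).getD f []
    match state_of.get? f with
    | some (some (first, true)) =>
      let label := (PySem.Dict.mk cfg).getD "label" (pvTitle (PySem.Str.replace f "_" " "))
      (acc.1.insert label first, acc.2)
    | _ => (acc.1, acc.2 ++ [f])) (PySem.Dict.empty, [])
  (r.1.items, r.2)

-- ===== PRECONDITION & SPEC =====
def Spec_extract_common_values_and_filter_columns (data : List (List (String × Option String))) (includes : List String) (column_config : List (String × List (String × String))) (out : (List (String × String)) × List String) : Prop := out = extract_common_values_and_filter_columns_alt data includes column_config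
instance (data : List (List (String × Option String))) (includes : List String) (column_config : List (String × List (String × String))) (out : (List (String × String)) × List String) : Decidable (Spec_extract_common_values_and_filter_columns data includes column_config out) := by unfold Spec_extract_common_values_and_filter_columns; infer_instance

-- ===== CLAIM (what is proved, stated in full; the proofs are below) =====
def Claim_equal_extract_common_values_and_filter_columns : Prop := ∀ (data : List (List (String × Option String))) (includes : List String) (column_config : List (String × List (String × String))), Dom_extract_common_values_and_filter_columns data includes column_config → Spec_extract_common_values_and_filter_columns data includes column_config (extract_common_values_and_filter_columns data includes column_config)


-- ===== LEMMAS AND PROOFS =====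

-- the can_be_common test A and B both perform for a field
def pvFlag (column_config : List (String × List (String × String))) (f : String) : Bool :=
  pvTruthy ((PySem.Dict.mk ((PySem.Dict.mk column_config).getD f [])).get? "can_be_common")

-- pvNorm as a function of the looked-up cell value
def pvNormV (v : Option String) : Option String :=
  match v with
  | some s => if PySem.Str.strip s == "" then none else some s
  | none => none

-- A's branch condition as a function of the column's cell values
def pvCond (vs : List (Option String)) : Bool :=
  let ne := vs.filter (fun v => v.isSome && !(PySem.Str.strip (v.getD "") == ""))
  let uq := PySem.Set.ofList (ne.map (fun v => v.getD ""))
  uq.length == 1 && decide (0 < ne.length) && ne.length == vs.length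

lemma pred_eq (v : Option String) :
    (v.isSome && !(PySem.Str.strip (v.getD "") == "")) = (pvNormV v).isSome := by
  cases v with
  | none => simp [pvNormV]
  | some s => simp only [pvNormV]; split <;> simp_all

lemma normV_eq_some (v : Option String) (t : String) :
    pvNormV v = some t ↔ v = some t ∧ (PySem.Str.strip t == "") = false := by
  cases v with
  | none => simp [pvNormV]
  | some s =>
    simp only [pvNormV]
    split <;> rename_i h <;> constructor <;> intro hh
    · exact absurd hh (by simp)
    · simp_all
    · simp_all
    · simp_all

-- one row-step of B's zip update, pointwise
lemma zip_map_upd (fields : List String) (g : String → Option (String × Bool))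
    (row : List (String × Option String)) :
    ((fields.zip (fields.map g)).map (fun p => pvUpd p.2 (pvNorm row p.1)))
      = fields.map (fun f => pvUpd (g f) (pvNorm row f)) := by
  induction fields with
  | nil => rfl
  | cons a t ih => simp [ih]

-- B's row-major fold computes, per field, the column-wise fold
lemma states_eq (data : List (List (String × Option String))) (fields : List String)
    (g : String → Option (String × Bool)) :
    data.foldl (fun (sts : List (Option (String × Bool))) row =>
        (fields.zip sts).map (fun p => pvUpd p.2 (pvNorm row p.1))) (fields.map g)
      = fields.map (fun f => data.foldl (fun st row => pvUpd st (pvNorm row f)) (g f)) := by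
  induction data generalizing g with
  | nil => rfl
  | cons row rest ih =>
    simp only [List.foldl_cons, zip_map_upd]
    exact ih (fun f => pvUpd (g f) (pvNorm row f))

-- lookup in dict(zip(fields, fields.map h))
lemma get?_zip_map (fields : List String) (h : String → Option (String × Bool)) (f : String) :
    (PySem.Dict.mk (fields.zip (fields.map h))).get? f
      = if f ∈ fields then some (h f) else none := by
  induction fields with
  | nil => simp [PySem.Dict.get?]
  | cons a t ih =>
    simp only [List.map_cons, List.zip_cons_cons, PySem.Dict.get?_mk_cons, ih]
    by_cases hfa : f = a
    · subst hfa; simp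
    · simp [Ne.symm hfa, hfa]

-- membership in B's fields list
lemma mem_fields (cc : List (String × List (String × String))) (includes : List String)
    (acc : List String) (f : String) :
    f ∈ includes.foldl (fun fs x =>
        if pvTruthy ((PySem.Dict.mk ((PySem.Dict.mk cc).getD x [])).get? "can_be_common")
            && !(fs.contains x) then fs ++ [x] else fs) acc
      ↔ f ∈ acc ∨ (f ∈ includes ∧ pvFlag cc f = true) := by
  induction includes generalizing acc with
  | nil => simp
  | cons x t ih =>
    simp only [List.foldl_cons, ih]
    by_cases hx : pvTruthy ((PySem.Dict.mk ((PySem.Dict.mk cc).getD x [])).get? "can_be_common")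
    · by_cases hc : acc.contains x
      · have hxin : x ∈ acc := by simpa using hc
        simp only [hx, hc]
        constructor
        · rintro (h | h)
          · exact Or.inl h
          · exact Or.inr ⟨List.mem_cons_of_mem _ h.1, h.2⟩
        · rintro (h | ⟨hm, hfl⟩)
          · exact Or.inl h
          · rcases List.mem_cons.mp hm with rfl | hm'
            · exact Or.inl hxin
            · exact Or.inr ⟨hm', hfl⟩
      · simp only [hx, hc, Bool.not_false, Bool.and_true]
        constructor
        · rintro (h | h)
          · rcases List.mem_append.mp h with h' | h'
            · exact Or.inl h'
            · rcases List.mem_singleton.mp h' with rfl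
              exact Or.inr ⟨List.mem_cons_self, hx⟩
          · exact Or.inr ⟨List.mem_cons_of_mem _ h.1, h.2⟩
        · rintro (h | ⟨hm, hfl⟩)
          · exact Or.inl (List.mem_append.mpr (Or.inl h))
          · rcases List.mem_cons.mp hm with rfl | hm'
            · exact Or.inl (List.mem_append.mpr (Or.inr (List.mem_singleton.mpr rfl)))
            · exact Or.inr ⟨hm', hfl⟩
    · rw [Bool.not_eq_true] at hx
      simp only [hx, Bool.false_and, Bool.false_eq_true, if_false]
      constructor
      · rintro (h | h)
        · exact Or.inl h
        · exact Or.inr ⟨List.mem_cons_of_mem _ h.1, h.2⟩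
      · rintro (h | ⟨hm, hfl⟩)
        · exact Or.inl h
        · rcases List.mem_cons.mp hm with rfl | hm'
          · exact absurd hfl (by unfold pvFlag; simp [hx])
          · exact Or.inr ⟨hm', hfl⟩

-- running B's per-column fold from a seen state
lemma foldl_upd_some (rest : List (Option String)) (first : String) (ok : Bool) :
    rest.foldl pvUpd (some (first, ok))
      = some (first, ok && rest.all (fun s => s == some first)) := by
  induction rest generalizing ok with
  | nil => simp
  | cons s t ih =>
    simp only [List.foldl_cons, pvUpd]
    rw [ih]
    cases s <;> simp [Bool.and_assoc]

-- B's per-column fold hits (t, true) exactly when every cell normalises to some t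
lemma fold_some_true_iff (ns : List (Option String)) (t : String) :
    ns.foldl pvUpd none = some (t, true) ↔ (ns ≠ [] ∧ ∀ s ∈ ns, s = some t) := by
  cases ns with
  | nil => simp
  | cons s0 rest =>
    cases s0 with
    | none =>
      simp only [List.foldl_cons, pvUpd, foldl_upd_some]
      simp
    | some u =>
      simp only [List.foldl_cons, pvUpd, foldl_upd_some]
      constructor
      · intro h
        have h0 := Option.some.inj h
        have h1 : u = t := congrArg Prod.fst h0
        have h2 : (true && rest.all (fun s => s == some u)) = true := congrArg Prod.snd h0
        subst h1
        have hall' : rest.all (fun s => s == some u) = true := by simpa using h2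
        refine ⟨by simp, ?_⟩
        intro s hs
        rcases List.mem_cons.mp hs with rfl | hs'
        · rfl
        · have := List.all_eq_true.mp hall' s hs'
          simpa using this
      · rintro ⟨-, hall⟩
        have hu : u = t := by
          have := hall (some u) (List.mem_cons_self)
          simpa using this
        subst hu
        have : rest.all (fun s => s == some u) = true := by
          apply List.all_eq_true.mpr
          intro s hs
          have := hall s (List.mem_cons_of_mem _ hs)
          simp [this]
        simp [this]

lemma singleton_of_all_eq (l : List String) (t : String) (hne : l ≠ [])
    (hall : ∀ x ∈ l, x = t) : PySem.Set.ofList l = [t] := by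
  have hmem : t ∈ PySem.Set.ofList l := by
    rw [PySem.Set.mem_ofList]
    cases l with
    | nil => exact absurd rfl hne
    | cons a l' => have := hall a List.mem_cons_self; subst this; exact List.mem_cons_self
  have hsub : ∀ x ∈ PySem.Set.ofList l, x = t := by
    intro x hx
    exact hall x ((PySem.Set.mem_ofList _ _).mp hx)
  have hnd := PySem.Set.nodup_ofList l
  cases hof : PySem.Set.ofList l with
  | nil => rw [hof] at hmem; exact absurd hmem (by simp)
  | cons a rest =>
    have ha : a = t := hsub a (by rw [hof]; exact List.mem_cons_self)
    cases rest with
    | nil => rw [ha]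
    | cons b rest' =>
      have hb : b = t := hsub b (by rw [hof]; exact List.mem_cons_of_mem _ List.mem_cons_self)
      rw [hof, List.nodup_cons] at hnd
      exact absurd (ha.trans hb.symm) (fun hab => hnd.1 (hab ▸ List.mem_cons_self))

-- when every cell normalises to some t, A's condition holds and its common value is t
lemma pvCond_eq_true (vs : List (Option String)) (t : String) (hne : vs ≠ [])
    (hall : ∀ v ∈ vs, pvNormV v = some t) :
    pvCond vs = true ∧
      (PySem.Set.ofList ((vs.filter (fun v => v.isSome && !(PySem.Str.strip (v.getD "") == ""))).map
        (fun v => v.getD ""))).headD "" = t := by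
  have hfil : vs.filter (fun v => v.isSome && !(PySem.Str.strip (v.getD "") == "")) = vs := by
    apply List.filter_eq_self.mpr
    intro v hv
    rw [pred_eq, (hall v hv)]
    rfl
  have hmap : ∀ x ∈ vs.map (fun v => v.getD ""), x = t := by
    intro x hx
    rcases List.mem_map.mp hx with ⟨v, hv, rfl⟩
    have := (normV_eq_some v t).mp (hall v hv)
    rw [this.1]
    rfl
  have hmapne : vs.map (fun v => v.getD "") ≠ [] := by
    simpa using hne
  have hset := singleton_of_all_eq _ t hmapne hmap
  constructor
  · unfold pvCond
    simp only [hfil, hset]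
    have hlen : 0 < vs.length := List.length_pos_iff.mpr hne
    simp [hlen]
  · rw [hfil, hset]
    rfl

-- when no single t fits, A's condition fails
lemma pvCond_eq_false (vs : List (Option String))
    (h : ¬ ∃ t, vs ≠ [] ∧ ∀ v ∈ vs, pvNormV v = some t) : pvCond vs = false := by
  by_contra hc
  have hc' : pvCond vs = true := by
    cases hcv : pvCond vs
    · exact absurd hcv hc
    · rfl
  unfold pvCond at hc'
  simp only [Bool.and_eq_true, beq_iff_eq, decide_eq_true_eq] at hc'
  obtain ⟨⟨huq, hpos⟩, hlen⟩ := hc'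
  have hallpred : ∀ v ∈ vs, (v.isSome && !(PySem.Str.strip (v.getD "") == "")) = true :=
    List.length_filter_eq_length_iff.mp hlen
  have hfil : vs.filter (fun v => v.isSome && !(PySem.Str.strip (v.getD "") == "")) = vs :=
    List.filter_eq_self.mpr hallpred
  rw [hfil] at huq hpos
  have hne : vs ≠ [] := List.length_pos_iff.mp hpos
  -- the unique set is a single element [u]
  obtain ⟨u, hu⟩ : ∃ u, PySem.Set.ofList (vs.map (fun v => v.getD "")) = [u] := by
    cases hof : PySem.Set.ofList (vs.map (fun v => v.getD "")) with
    | nil => rw [hof] at huq; simp at huq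
    | cons a rest =>
      cases rest with
      | nil => exact ⟨a, rfl⟩
      | cons b r => rw [hof] at huq; simp at huq
  apply h
  refine ⟨u, hne, ?_⟩
  intro v hv
  have hpred : (pvNormV v).isSome := by rw [← pred_eq]; exact hallpred v hv
  cases hnv : pvNormV v with
  | none => rw [hnv] at hpred; simp at hpred
  | some w =>
    have hvw : v = some w := ((normV_eq_some v w).mp hnv).1
    have hwmem : w ∈ PySem.Set.ofList (vs.map (fun v => v.getD "")) := by
      rw [PySem.Set.mem_ofList]
      apply List.mem_map.mpr
      exact ⟨v, hv, by rw [hvw]; rfl⟩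
    rw [hu] at hwmem
    have : w = u := by simpa using hwmem
    exact congrArg some this

lemma foldl_upd_none_iff (ns : List (Option String)) :
    ns.foldl pvUpd none = none ↔ ns = [] := by
  cases ns with
  | nil => simp
  | cons s0 rest => cases s0 <;> simp [List.foldl_cons, pvUpd, foldl_upd_some]

-- ===== VERDICT (by name: the statement is the Claim_ definition above) =====
theorem extract_common_values_and_filter_columns_spec : Claim_equal_extract_common_values_and_filter_columns := by
  intro data includes cc _
  unfold Spec_extract_common_values_and_filter_columns
  unfold extract_common_values_and_filter_columns extract_common_values_and_filter_columns_alt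
  simp only [states_eq]
  refine congrArg (fun r : PySem.Dict String String × List String => (r.1.items, r.2)) ?_
  apply PySem.List.foldl_congr_mem
  intro acc x hx
  rw [get?_zip_map]
  by_cases hfl : pvFlag cc x
  · rw [if_pos ((mem_fields cc includes [] x).mpr (Or.inr ⟨hx, hfl⟩))]
    have hflx : pvTruthy ((PySem.Dict.mk ((PySem.Dict.mk cc).getD x [])).get? "can_be_common") = true := hfl
    rw [if_pos hflx]
    rw [← List.foldl_map]
    have hns : data.map (fun row => pvNorm row x)
        = (data.map (fun row => ((PySem.Dict.mk row).get? x).join)).map pvNormV := by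
      rw [List.map_map]; rfl
    rw [hns]
    cases hres : ((data.map (fun row => ((PySem.Dict.mk row).get? x).join)).map pvNormV).foldl pvUpd none with
    | none =>
      have hdata : data = [] := by
        have := (foldl_upd_none_iff _).mp hres
        simpa using this
      subst hdata
      rfl
    | some p =>
      obtain ⟨t, b⟩ := p
      cases b with
      | true =>
        obtain ⟨hne_ns, hall_ns⟩ := (fold_some_true_iff _ t).mp hres
        have hvs_ne : data.map (fun row => ((PySem.Dict.mk row).get? x).join) ≠ [] := by
          intro h0; exact hne_ns (by rw [h0]; rfl)
        have hall : ∀ v ∈ data.map (fun row => ((PySem.Dict.mk row).get? x).join), pvNormV v = some t := by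
          intro v hv
          exact hall_ns _ (List.mem_map_of_mem hv)
        obtain ⟨hcond, hhead⟩ := pvCond_eq_true _ t hvs_ne hall
        unfold pvCond at hcond
        simp only [List.length_map] at hcond
        rw [hcond]
        simp only [if_true, hhead]
      | false =>
        have hnot : ¬ ∃ t', (data.map (fun row => ((PySem.Dict.mk row).get? x).join)) ≠ [] ∧
            ∀ v ∈ data.map (fun row => ((PySem.Dict.mk row).get? x).join), pvNormV v = some t' := by
          rintro ⟨t', hne', hall'⟩
          have : ((data.map (fun row => ((PySem.Dict.mk row).get? x).join)).map pvNormV).foldl pvUpd none = some (t', true) := by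
            apply (fold_some_true_iff _ t').mpr
            refine ⟨by simpa using hne', ?_⟩
            intro s hs
            rcases List.mem_map.mp hs with ⟨v, hv, rfl⟩
            exact hall' v hv
          rw [hres] at this
          simp at this
        have hcond := pvCond_eq_false _ (by
          rintro ⟨t', h1, h2⟩
          exact hnot ⟨t', h1, h2⟩)
        unfold pvCond at hcond
        simp only [List.length_map] at hcond
        rw [hcond]
        rfl
  · have hmem : x ∉ includes.foldl (fun fs f =>
        if pvTruthy ((PySem.Dict.mk ((PySem.Dict.mk cc).getD f [])).get? "can_be_common")
            && !(fs.contains f) then fs ++ [f] else fs) [] := by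
      rw [mem_fields]
      rintro (h | ⟨-, h⟩)
      · simp at h
      · exact hfl h
    have hflx : ¬ (pvTruthy ((PySem.Dict.mk ((PySem.Dict.mk cc).getD x [])).get? "can_be_common") = true) := hfl
    rw [if_neg hmem, if_neg hflx]
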